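-- pv_equiv track=rewrite | github.com/ZetsubouCode/BatchBench | services/normalizer.py | clean_input_list
-- ===== SOURCE A (Python) =====
-- from typing import Dict, List, Optional, Set, Tuple
--
-- def clean_input_list(raw: str) -> Set[str]:
--     """
--     Accepts comma/newline separated strings and returns a clean set of tags.
--     """
--     if not raw:
--         return set()
--     parts = []
--     for line in raw.replace("\r", "\n").split("\n"):
--         for token in line.split(","):
--             val = token.strip()
--             if val:
--                 parts.append(val)
--     return set(parts)
-- ===== SOURCE B (Python) =====
-- def clean_input_list(raw: str):
--     """
--     Accepts comma/newline separated strings and returns a clean set of tags.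
--     Single character-level scan instead of replace + nested splits.
--     """
--     tags = set()
--     token = ""
--     for ch in raw:
--         if ch in ",\n\r":
--             t = token.strip()
--             if t:
--                 tags.add(t)
--             token = ""
--         else:
--             token += ch
--     t = token.strip()
--     if t:
--         tags.add(t)
--     return tags
-- ===== Notes on version B (the rewrite author's own statement) =====
-- stated objective: alternative
-- what changed: Replaces A's carriage-return substitution followed by a newline split and a per-line comma split (two nested loops) with a single character-level scan that accumulates a token buffer and flushes each stripped nonempty token into the set when a delimiter is reached.
import Mathlib
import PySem

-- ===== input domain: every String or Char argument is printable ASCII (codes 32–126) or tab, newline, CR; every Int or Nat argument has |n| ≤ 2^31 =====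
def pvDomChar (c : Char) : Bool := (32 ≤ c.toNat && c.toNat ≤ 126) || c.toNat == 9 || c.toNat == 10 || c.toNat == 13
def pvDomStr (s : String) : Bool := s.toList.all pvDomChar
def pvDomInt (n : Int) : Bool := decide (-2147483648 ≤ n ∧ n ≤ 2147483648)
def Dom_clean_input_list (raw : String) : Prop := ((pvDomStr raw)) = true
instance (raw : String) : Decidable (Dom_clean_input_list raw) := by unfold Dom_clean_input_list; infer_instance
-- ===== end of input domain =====

-- B replaces A's replace-then-nested-splits tokenization by a single character-level scan with a token
-- accumulator (objective: alternative, same O(n) cost); both return the same tag set in the same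
-- first-insertion order.

-- ===== PORT A =====
-- A: guard on empty, replace '\r' by '\n', split into lines, split each line on ',', strip, collect
-- the nonempty tokens, return set(parts).
def clean_input_list (raw : String) : List String :=
  if raw.toList = [] then []
  else
    let parts : List String :=
      (PySem.Chars.splitOn (PySem.Chars.replace raw.toList ['\r'] ['\n']) ['\n']).foldl
        (fun acc line =>
          (PySem.Chars.splitOn line [',']).foldl
            (fun acc2 tok =>
              let val := PySem.Chars.strip tok
              if val ≠ [] then acc2 ++ [String.ofList val] else acc2)
            acc)
        []
    PySem.Set.ofList parts

-- ===== PORT B =====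
-- B: one pass over the characters; a delimiter flushes the stripped token buffer into the set.
def bStep (st : PySem.Set String × List Char) (c : Char) : PySem.Set String × List Char :=
  if c = ',' ∨ c = '\n' ∨ c = '\r' then
    let t := PySem.Chars.strip st.2
    (if t ≠ [] then PySem.Set.add st.1 (String.ofList t) else st.1, [])
  else (st.1, st.2 ++ [c])

def clean_input_list_alt (raw : String) : List String :=
  let fin := raw.toList.foldl bStep (PySem.Set.empty, [])
  let t := PySem.Chars.strip fin.2
  if t ≠ [] then PySem.Set.add fin.1 (String.ofList t) else fin.1

-- ===== PRECONDITION & SPEC =====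
def Spec_clean_input_list (raw : String) (out : List String) : Prop := out = clean_input_list_alt raw
instance (raw : String) (out : List String) : Decidable (Spec_clean_input_list raw out) := by unfold Spec_clean_input_list; infer_instance

-- ===== CLAIM (what is proved, stated in full; the proofs are below) =====
def Claim_equal_clean_input_list : Prop := ∀ (raw : String), Dom_clean_input_list raw → Spec_clean_input_list raw (clean_input_list raw)

-- ===== LEMMAS AND PROOFS =====

theorem modifyHead_id' {α : Type} (l : List α) : List.modifyHead (fun x => x) l = l := by
  cases l <;> simp

theorem modifyHead_comp {α : Type} (f g : α → α) (l : List α) :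
    List.modifyHead g (List.modifyHead f l) = List.modifyHead (fun x => g (f x)) l := by
  cases l <;> simp

theorem modifyHead_append_left {α : Type} (f : α → α) (l r : List α) (h : l ≠ []) :
    List.modifyHead f (l ++ r) = List.modifyHead f l ++ r := by
  cases l with
  | nil => exact absurd rfl h
  | cons a t => simp

-- single-delimiter split, structurally
def sp (d : Char) : List Char → List (List Char)
  | [] => [[]]
  | c :: cs => if c = d then [] :: sp d cs else (sp d cs).modifyHead (c :: ·)

theorem sp_ne_nil (d : Char) (l : List Char) : sp d l ≠ [] := by
  cases l with
  | nil => simp [sp]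
  | cons c cs => simp only [sp]; split <;> simp [List.modifyHead_eq_nil_iff, sp_ne_nil d cs]

theorem go_spec (d : Char) : ∀ (l : List Char) (fuel : Nat) (cur : List Char) (acc : List (List Char)),
    l.length ≤ fuel →
    PySem.Chars.splitOn.go [d] fuel l cur acc = acc.reverse ++ ((sp d l).modifyHead (cur.reverse ++ ·)) := by
  intro l
  induction l with
  | nil => intro fuel cur acc h; cases fuel <;> simp [PySem.Chars.splitOn.go, sp]
  | cons c rest ih =>
    intro fuel cur acc h
    cases fuel with
    | zero => simp at h
    | succ f =>
      simp only [PySem.Chars.splitOn.go]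
      by_cases hc : c = d
      · subst hc
        have hp : List.isPrefixOf [c] (c :: rest) = true := by simp [List.isPrefixOf]
        rw [if_pos hp]
        simp only [List.length_cons] at h
        simp only [List.length_singleton, List.drop_succ_cons, List.drop_zero]
        rw [ih f [] (cur.reverse :: acc) (by omega)]
        simp [sp, modifyHead_id']
      · have hp : ¬ List.isPrefixOf [d] (c :: rest) = true := by
          simp [List.isPrefixOf]; intro h'; exact hc h'.symm
        rw [if_neg hp]
        simp only [List.length_cons] at h
        rw [ih f (c :: cur) acc (by omega)]
        simp only [sp, if_neg hc]
        congr 1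
        cases hsp : sp d rest with
        | nil => exact absurd hsp (sp_ne_nil d rest)
        | cons hgroup t => simp

theorem splitOn_single (d : Char) (l : List Char) : PySem.Chars.splitOn l [d] = sp d l := by
  unfold PySem.Chars.splitOn
  rw [go_spec d l (l.length + 1) [] [] (by omega)]
  simp [modifyHead_id']

def rsub (c : Char) : Char := if c = '\r' then '\n' else c

theorem rep_go : ∀ (l : List Char) (fuel : Nat) (acc : List Char), l.length ≤ fuel →
    PySem.Chars.replace.go ['\r'] ['\n'] fuel l acc = acc.reverse ++ l.map rsub := by
  intro l
  induction l with
  | nil => intro fuel acc h; cases fuel <;> simp [PySem.Chars.replace.go]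
  | cons c rest ih =>
    intro fuel acc h
    cases fuel with
    | zero => simp at h
    | succ f =>
      simp only [PySem.Chars.replace.go]
      simp only [List.length_cons] at h
      by_cases hc : c = '\r'
      · subst hc
        have hp : List.isPrefixOf ['\r'] ('\r' :: rest) = true := by simp [List.isPrefixOf]
        rw [if_pos hp]
        simp only [List.length_singleton, List.drop_succ_cons, List.drop_zero]
        rw [ih f _ (by omega)]
        simp [rsub]
      · have hp : ¬ List.isPrefixOf ['\r'] (c :: rest) = true := by
          simp [List.isPrefixOf]; intro h'; exact hc h'.symm
        rw [if_neg hp]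
        rw [ih f _ (by omega)]
        simp [rsub, hc]

theorem replace_cr (l : List Char) : PySem.Chars.replace l ['\r'] ['\n'] = l.map rsub := by
  unfold PySem.Chars.replace
  rw [if_neg (by simp)]
  rw [rep_go l l.length [] (Nat.le_refl _)]
  simp

-- tokens of the combined three-delimiter split
def toks : List Char → List (List Char)
  | [] => [[]]
  | c :: cs => if c = ',' ∨ c = '\n' ∨ c = '\r' then [] :: toks cs else (toks cs).modifyHead (c :: ·)

theorem toks_eq (cs : List Char) :
    (sp '\n' (cs.map rsub)).flatMap (sp ',') = toks cs := by
  induction cs with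
  | nil => simp [sp, toks]
  | cons c cs ih =>
    simp only [List.map_cons, toks]
    by_cases hr : c = '\r'
    · subst hr
      rw [show rsub '\r' = '\n' from rfl]
      rw [sp, if_pos rfl, List.flatMap_cons, ih]
      rw [if_pos (Or.inr (Or.inr rfl))]
      simp [sp]
    · have hrs : rsub c = c := by simp [rsub, hr]
      rw [hrs]
      by_cases hn : c = '\n'
      · subst hn
        rw [sp, if_pos rfl, List.flatMap_cons, ih]
        rw [if_pos (Or.inr (Or.inl rfl))]
        simp [sp]
      · rw [sp, if_neg hn]
        cases hsp : sp '\n' (cs.map rsub) with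
        | nil => exact absurd hsp (sp_ne_nil _ _)
        | cons h t =>
          rw [hsp] at ih
          simp only [List.modifyHead_cons, List.flatMap_cons] at ih ⊢
          by_cases hcomma : c = ','
          · subst hcomma
            rw [if_pos (Or.inl rfl)]
            rw [sp, if_pos rfl]
            rw [← ih]
            simp
          · rw [if_neg (by simp [hcomma, hn, hr])]
            rw [sp, if_neg hcomma]
            rw [← ih]
            rw [modifyHead_append_left _ _ _ (sp_ne_nil _ _)]

-- stripped nonempty tokens, as strings
def good (ts : List (List Char)) : List String :=
  ((ts.map PySem.Chars.strip).filter (fun t => t ≠ [])).map String.ofList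

theorem good_append (a b : List (List Char)) : good (a ++ b) = good a ++ good b := by
  simp [good]

theorem innerA (ts : List (List Char)) : ∀ (acc : List String),
    ts.foldl (fun acc2 tok =>
        let val := PySem.Chars.strip tok
        if val ≠ [] then acc2 ++ [String.ofList val] else acc2) acc
      = acc ++ good ts := by
  induction ts with
  | nil => intro acc; simp [good]
  | cons t ts ih =>
    intro acc
    simp only [List.foldl_cons]
    rw [ih]
    by_cases h : PySem.Chars.strip t = []
    · simp [good, h]
    · simp [good, h]

theorem outerA (lines : List (List Char)) : ∀ (acc : List String),
    lines.foldl (fun acc line =>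
        (PySem.Chars.splitOn line [',']).foldl
          (fun acc2 tok =>
            let val := PySem.Chars.strip tok
            if val ≠ [] then acc2 ++ [String.ofList val] else acc2)
          acc) acc
      = acc ++ good (lines.flatMap (sp ',')) := by
  induction lines with
  | nil => intro acc; simp [good]
  | cons l ls ih =>
    intro acc
    simp only [List.foldl_cons, List.flatMap_cons]
    rw [splitOn_single, innerA, ih, good_append, List.append_assoc]

theorem A_eq (raw : String) :
    clean_input_list raw = PySem.Set.ofList (good (toks raw.toList)) := by
  unfold clean_input_list
  by_cases h : raw.toList = []
  · rw [if_pos h, h]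
    simp [toks, good, PySem.Chars.strip, PySem.Chars.lstrip, PySem.Chars.rstrip, PySem.Set.ofList]
  · rw [if_neg h, replace_cr, splitOn_single, outerA, toks_eq]
    simp

theorem update_append (s : PySem.Set String) (a b : List String) :
    PySem.Set.update s (a ++ b) = PySem.Set.update (PySem.Set.update s a) b := by
  simp [PySem.Set.update, List.foldl_append]

def finishB (st : PySem.Set String × List Char) : List String :=
  let t := PySem.Chars.strip st.2
  if t ≠ [] then PySem.Set.add st.1 (String.ofList t) else st.1

theorem B_inv : ∀ (cs : List Char) (s : PySem.Set String) (buf : List Char),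
    finishB (cs.foldl bStep (s, buf))
      = PySem.Set.update s (good ((toks cs).modifyHead (buf ++ ·))) := by
  intro cs
  induction cs with
  | nil =>
    intro s buf
    simp only [List.foldl_nil, toks, List.modifyHead_cons, List.append_nil]
    by_cases h : PySem.Chars.strip buf = []
    · simp [finishB, good, h, PySem.Set.update]
    · simp [finishB, good, h, PySem.Set.update]
  | cons c cs ih =>
    intro s buf
    simp only [List.foldl_cons, bStep]
    by_cases hd : c = ',' ∨ c = '\n' ∨ c = '\r'
    · rw [if_pos hd]
      rw [ih]
      simp only [toks, if_pos hd, List.modifyHead_cons, List.append_nil]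
      have hmod : List.modifyHead (fun x => ([] : List Char) ++ x) (toks cs)
          = toks cs := by
        simp only [List.nil_append]
        exact modifyHead_id' _
      rw [hmod]
      have hgood : good (buf :: toks cs) = good [buf] ++ good (toks cs) := by
        have : buf :: toks cs = [buf] ++ toks cs := rfl
        rw [this, good_append]
      rw [hgood, update_append]
      congr 1
      by_cases h : PySem.Chars.strip buf = []
      · simp [good, h, PySem.Set.update]
      · simp [good, h, PySem.Set.update]
    · rw [if_neg hd]
      rw [ih]
      simp only [toks, if_neg hd]
      rw [modifyHead_comp]
      have : (fun x => buf ++ c :: x) = (fun x => (buf ++ [c]) ++ x) := by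
        funext x; simp
      rw [this]

theorem B_eq (raw : String) :
    clean_input_list_alt raw = PySem.Set.ofList (good (toks raw.toList)) := by
  unfold clean_input_list_alt
  have h := B_inv raw.toList PySem.Set.empty []
  simp only [finishB] at h
  rw [h]
  have hmod : List.modifyHead (fun x => ([] : List Char) ++ x) (toks raw.toList)
      = toks raw.toList := by
    simp only [List.nil_append]
    exact modifyHead_id' _
  rw [hmod]
  rw [PySem.Set.ofList_eq_foldl]
  rfl

-- ===== VERDICT (by name: the statement is the Claim_ definition above) =====
theorem clean_input_list_spec : Claim_equal_clean_input_list := by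
  intro raw _
  unfold Spec_clean_input_list
  rw [A_eq, B_eq]
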